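-- pv_equiv track=rewrite | github.com/shiabehugo/48otw | getSongNames/py.py | findStartingIndex
-- ===== SOURCE A (Python) =====
-- def findStartingIndex(fileList):
--
-- 	charsToCheck = min([len(x) for x in fileList])
-- 	differentChars = [0 for j in range(charsToCheck)]
--
-- 	for i in range(charsToCheck):
-- 		alreadySeenChars = []
-- 		for file in fileList:
-- 			if file[i] not in alreadySeenChars:
-- 				differentChars[i] += 1
-- 				alreadySeenChars.append(file[i])
--
-- 	startIndex = charsToCheck - 1
-- 	while startIndex > -1 and differentChars[startIndex] != 1:
-- 		startIndex -= 1
-- 	return startIndex + 1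
-- ===== SOURCE B (Python) =====
-- def findStartingIndex(fileList):
--     first = fileList[0]
--     limit = min(len(x) for x in fileList)
--     ans = 0
--     for i in range(limit):
--         if all(f[i] == first[i] for f in fileList):
--             ans = i + 1
--     return ans
-- ===== Notes on version B (the rewrite author's own statement) =====
-- stated objective: alternative
-- what changed: Replaces A's per-position distinct-character count table (with a membership scan of a seen-list per file) plus separate backward while-scan with a single forward pass keeping a max-accumulator: at each position it checks whether every file's character equals the first file's character (no seen-list, no table), remembering the last such position + 1.
import Mathlib
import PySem

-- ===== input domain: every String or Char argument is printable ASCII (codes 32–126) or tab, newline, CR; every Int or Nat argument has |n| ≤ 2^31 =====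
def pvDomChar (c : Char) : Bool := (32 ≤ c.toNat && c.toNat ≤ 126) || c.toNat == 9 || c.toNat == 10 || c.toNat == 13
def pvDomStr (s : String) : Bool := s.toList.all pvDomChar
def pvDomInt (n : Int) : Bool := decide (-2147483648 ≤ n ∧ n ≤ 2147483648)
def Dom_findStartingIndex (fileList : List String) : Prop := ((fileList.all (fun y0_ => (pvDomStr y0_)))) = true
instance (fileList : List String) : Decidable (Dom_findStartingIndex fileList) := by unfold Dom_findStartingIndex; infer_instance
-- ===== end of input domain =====

-- B replaces A's distinct-count table + backward while-scan with one forward pass keeping a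
-- max-accumulator, comparing every file's character against the first file's character.

-- ===== PORT A =====
-- inner 'for file in fileList' loop of A: state = (differentChars[i] so far, alreadySeenChars).
-- file[i] is ported as pyGet? (Option Char): i < min length ≤ len file, so it is never none where A runs.
def innerA (fileList : List String) (i : Int) : Int × List (Option Char) :=
  fileList.foldl
    (fun st f =>
      if st.2.contains (PySem.Str.pyGet? f i) then st
      else (st.1 + 1, st.2 ++ [PySem.Str.pyGet? f i]))
    (0, [])

-- the trailing 'while startIndex > -1 and differentChars[startIndex] != 1' loop, k = startIndex + 1
def scanA (t : List Int) : Nat → Int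
  | 0 => 0
  | j + 1 => if PySem.List.pyGetD t (j : Int) 0 ≠ 1 then scanA t j else (j : Int) + 1

def findStartingIndex (fileList : List String) : Int :=
  match PySem.List.min? (fileList.map (fun x => PySem.Str.len x)) (fun v => v) with
  | none => 0  -- Python: min([]) raises ValueError; excluded by Pre_
  | some charsToCheck =>
      let differentChars :=
        (PySem.List.pyRange 0 charsToCheck 1).map (fun i => (innerA fileList i).1)
      scanA differentChars charsToCheck.toNat

-- ===== PORT B =====
-- 'all(f[i] == first[i] for f in fileList)'
def allSameAt (fileList : List String) (first : String) (i : Int) : Bool :=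
  fileList.all (fun f => PySem.Str.pyGet? f i == PySem.Str.pyGet? first i)

def findStartingIndex_alt (fileList : List String) : Int :=
  match PySem.List.pyGet? fileList 0 with
  | none => 0  -- Python: fileList[0] raises IndexError on []; excluded by Pre_
  | some first =>
      match PySem.List.min? (fileList.map (fun x => PySem.Str.len x)) (fun v => v) with
      | none => 0
      | some limit =>
          (PySem.List.pyRange 0 limit 1).foldl
            (fun ans i => if allSameAt fileList first i then i + 1 else ans) 0

-- ===== PRECONDITION & SPEC =====
-- Pre_ excludes only the empty list, on which both Pythons raise (A: ValueError, B: IndexError).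
def Pre_findStartingIndex (fileList : List String) : Prop := fileList ≠ []
instance (fileList : List String) : Decidable (Pre_findStartingIndex fileList) := by
  unfold Pre_findStartingIndex; infer_instance
def pvWitness_findStartingIndex : List String := ["ab", "ac"]

def Spec_findStartingIndex (fileList : List String) (out : Int) : Prop := out = findStartingIndex_alt fileList
instance (fileList : List String) (out : Int) : Decidable (Spec_findStartingIndex fileList out) := by unfold Spec_findStartingIndex; infer_instance

-- ===== CLAIM (what is proved, stated in full; the proofs are below) =====
def Claim_equal_findStartingIndex : Prop := ∀ (fileList : List String), Dom_findStartingIndex fileList → Pre_findStartingIndex fileList → Spec_findStartingIndex fileList (findStartingIndex fileList)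

-- ===== LEMMAS AND PROOFS =====

-- A's inner loop, started at any seen-set s with count = s.length, folds exactly Set.add.
lemma innerA_aux (l : List (Option Char)) :
    ∀ s : List (Option Char),
      l.foldl
        (fun st c => if st.2.contains c then st else (st.1 + 1, st.2 ++ [c]))
        ((s.length : Int), s)
      = (((l.foldl PySem.Set.add s).length : Int), l.foldl PySem.Set.add s) := by
  induction l with
  | nil => intro s; simp
  | cons c l ih =>
      intro s
      by_cases h : c ∈ s
      · simpa [PySem.Set.add, PySem.Set.contains, h] using ih s
      · have := ih (s ++ [c])
        simp only [List.length_append, List.length_singleton] at this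
        simpa [PySem.Set.add, PySem.Set.contains, h, add_comm] using this

lemma foldl_add_const {α : Type} [BEq α] [LawfulBEq α] (x : α) (xs : List α)
    (h : ∀ y ∈ xs, y = x) : xs.foldl PySem.Set.add [x] = [x] := by
  induction xs with
  | nil => rfl
  | cons y ys ih =>
      have hy := h y (by simp)
      subst hy
      simp only [List.foldl_cons]
      rw [show PySem.Set.add [y] y = [y] from by simp [PySem.Set.add, PySem.Set.contains]]
      exact ih fun z hz => h z (by simp [hz])

-- distinct count of x :: xs is 1 iff every element equals x
lemma set_len_one_iff {α : Type} [BEq α] [LawfulBEq α] (x : α) (xs : List α) :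
    (PySem.Set.ofList (x :: xs)).length = 1 ↔ ∀ y ∈ xs, y = x := by
  constructor
  · intro hl y hy
    obtain ⟨a, ha⟩ := List.length_eq_one_iff.mp hl
    have hx : x ∈ PySem.Set.ofList (x :: xs) := (PySem.Set.mem_ofList _ _).mpr (by simp)
    have hy' : y ∈ PySem.Set.ofList (x :: xs) := (PySem.Set.mem_ofList _ _).mpr (by simp [hy])
    rw [ha] at hx hy'
    simp only [List.mem_singleton] at hx hy'
    rw [hy', ← hx]
  · intro h
    rw [PySem.Set.ofList_eq_foldl]
    simp only [List.foldl_cons]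
    rw [show PySem.Set.add [] x = [x] from rfl, foldl_add_const x xs h]
    rfl

-- A's distinct count at position i equals 1 iff all files agree with the first file at i.
lemma count_one_iff (f0 : String) (rest : List String) (i : Int) :
    ((innerA (f0 :: rest) i).1 = 1) ↔ allSameAt (f0 :: rest) f0 i = true := by
  unfold innerA allSameAt
  have h := innerA_aux ((f0 :: rest).map (fun f => PySem.Str.pyGet? f i)) []
  rw [List.foldl_map] at h
  simp only [List.length_nil, Nat.cast_zero] at h
  rw [h]
  have key := set_len_one_iff (PySem.Str.pyGet? f0 i)
      (rest.map (fun f => PySem.Str.pyGet? f i))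
  rw [PySem.Set.ofList_eq_foldl] at key
  simp only [List.map_cons, List.foldl_cons] at key ⊢
  constructor
  · intro hl
    have hl' : (List.foldl PySem.Set.add (PySem.Set.add [] (PySem.Str.pyGet? f0 i))
        (rest.map (fun f => PySem.Str.pyGet? f i))).length = 1 := by exact_mod_cast hl
    have hn := key.mp hl'
    simp only [List.all_cons, beq_self_eq_true, Bool.true_and, List.all_eq_true, beq_iff_eq]
    intro f hf
    exact hn _ (List.mem_map_of_mem hf)
  · intro hall
    have hpt : ∀ y ∈ rest.map (fun f => PySem.Str.pyGet? f i), y = PySem.Str.pyGet? f0 i := by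
      simp only [List.all_cons, beq_self_eq_true, Bool.true_and, List.all_eq_true,
        beq_iff_eq] at hall
      intro y hy
      obtain ⟨f, hf, rfl⟩ := List.mem_map.mp hy
      exact hall f hf
    exact_mod_cast key.mpr hpt

-- backward while-scan over the table = forward max-fold over the range
lemma scan_eq (f0 : String) (rest : List String) (m : Int) :
    ∀ k : Nat, (k : Int) ≤ m →
      scanA ((PySem.List.pyRange 0 m 1).map (fun i => (innerA (f0 :: rest) i).1)) k
        = (PySem.List.pyRange 0 (k : Int) 1).foldl
            (fun ans i => if allSameAt (f0 :: rest) f0 i then i + 1 else ans) 0 := by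
  intro k
  induction k with
  | zero => intro _; rfl
  | succ j ih =>
      intro hk
      have hj : (j : Int) < m := by push_cast at hk ⊢; omega
      have hg : PySem.List.pyGetD
          ((PySem.List.pyRange 0 m 1).map (fun i => (innerA (f0 :: rest) i).1)) (j : Int) 0
          = (innerA (f0 :: rest) (j : Int)).1 :=
        PySem.List.pyGetD_map_pyRange_of_nonneg _ m (j : Int) 0 (by positivity) hj
      have hr : PySem.List.pyRange 0 ((j : Int) + 1) 1
          = PySem.List.pyRange 0 (j : Int) 1 ++ [(j : Int)] :=
        PySem.List.pyRange_one_succ_right (by positivity)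
      have hcast : ((j + 1 : Nat) : Int) = (j : Int) + 1 := by push_cast; ring
      rw [hcast, hr, List.foldl_append]
      simp only [scanA, List.foldl_cons, List.foldl_nil]
      rw [hg]
      by_cases h : allSameAt (f0 :: rest) f0 (j : Int) = true
      · rw [if_neg (by simpa using (count_one_iff f0 rest (j : Int)).mpr h), if_pos h]
      · rw [if_pos (fun hc => h ((count_one_iff f0 rest (j : Int)).mp hc)),
          if_neg h, ih (by push_cast at hk ⊢; omega)]

-- ===== VERDICT (by name: the statement is the Claim_ definition above) =====
theorem findStartingIndex_spec : Claim_equal_findStartingIndex := by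
  intro fileList _ hpre
  unfold Spec_findStartingIndex findStartingIndex findStartingIndex_alt
  cases fileList with
  | nil => exact absurd rfl hpre
  | cons f0 rest =>
      have hget : PySem.List.pyGet? (f0 :: rest) 0 = some f0 := by
        simp [PySem.List.pyGet?, PySem.List.pyIdx?]
      rw [hget]
      cases hmin : PySem.List.min? ((f0 :: rest).map (fun x => PySem.Str.len x)) (fun v => v) with
      | none => rfl
      | some m =>
          have hm : 0 ≤ m := by
            have hmem := PySem.List.min?_mem hmin
            obtain ⟨s, _, hs⟩ := List.mem_map.mp hmem
            simp [← hs, PySem.Str.len]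
          have := scan_eq f0 rest m m.toNat (by omega)
          rw [Int.toNat_of_nonneg hm] at this
          simpa using this
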